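-- pv_equiv track=rewrite | github.com/snorbi95/Programming1 | Gyakorlatok/3. gyakorlat/gyak3_1.py | lista_feltoltes
-- ===== SOURCE A (Python) =====
-- def lista_feltoltes(args):
--     list1 = []
--     list2 = [] #eredmeny listak inicializalasa
--     num_l = 0 #lista sorszam inicializalas
--     for arg in args: #az argumenumokn sorban végig megyünk
--         if arg == "L:": #ha egy lista kezdetét találjuk
--             num_l += 1 #növeljük a sorszámot
--         else: #ellenben, ha listán beül járunk
--             if num_l == 1: #megnézzük, hogy mely sorszámnál tartunk
--                 list1.append(arg)
--             elif num_l == 2: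
--                 list2.append(arg)
--
--     return list1, list2
-- ===== SOURCE B (Python) =====
-- def lista_feltoltes(args):
--     groups = [[]]
--     for arg in args:
--         if arg == "L:":
--             groups.append([])
--         else:
--             groups[-1].append(arg)
--     list1 = groups[1] if len(groups) > 1 else []
--     list2 = groups[2] if len(groups) > 2 else []
--     return list1, list2
-- ===== Notes on version B (the rewrite author's own statement) =====
-- stated objective: alternative
-- what changed: Replaces the num_l counter with per-element if/elif dispatch into two accumulators by a partition-into-segments pass (a list of buckets, new bucket on each 'L:') followed by selecting buckets 1 and 2.
import Mathlib
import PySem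

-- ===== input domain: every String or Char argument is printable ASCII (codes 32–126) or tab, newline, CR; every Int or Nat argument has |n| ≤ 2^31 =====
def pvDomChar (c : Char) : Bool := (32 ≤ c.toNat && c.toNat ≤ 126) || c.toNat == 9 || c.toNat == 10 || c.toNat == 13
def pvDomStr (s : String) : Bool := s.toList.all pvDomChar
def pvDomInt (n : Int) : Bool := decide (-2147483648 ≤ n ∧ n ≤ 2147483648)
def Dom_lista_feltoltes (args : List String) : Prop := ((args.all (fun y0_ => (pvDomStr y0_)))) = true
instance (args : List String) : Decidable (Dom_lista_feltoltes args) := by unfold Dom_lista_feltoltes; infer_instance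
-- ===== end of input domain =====

-- B replaces the num_l counter with dispatch into two accumulators by a partition-into-segments
-- pass (new bucket on each "L:"), then selects buckets 1 and 2; objective: alternative decomposition.
-- ===== PORT A =====
def lista_feltoltes (args : List String) : List String × List String :=
  let st := args.foldl (fun (st : List String × List String × Int) arg =>
    if arg == "L:" then (st.1, st.2.1, st.2.2 + 1)
    else if st.2.2 == 1 then (st.1 ++ [arg], st.2.1, st.2.2)
    else if st.2.2 == 2 then (st.1, st.2.1 ++ [arg], st.2.2)
    else st) ([], [], 0)
  (st.1, st.2.1)

-- B: partition args into segments (new bucket on each "L:"), then select buckets 1 and 2.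
-- ===== PORT B =====
-- groups[-1].append(arg): append x to the last bucket
def pvAppendLast (gs : List (List String)) (x : String) : List (List String) :=
  match gs with
  | [] => []
  | [g] => [g ++ [x]]
  | g :: rest => g :: pvAppendLast rest x

def lista_feltoltes_alt (args : List String) : List String × List String :=
  let groups := args.foldl (fun gs arg =>
    if arg == "L:" then gs ++ [[]] else pvAppendLast gs arg) [[]]
  (groups.getD 1 [], groups.getD 2 [])

-- ===== PRECONDITION & SPEC =====
def Spec_lista_feltoltes (args : List String) (out : List String × List String) : Prop := out = lista_feltoltes_alt args
instance (args : List String) (out : List String × List String) : Decidable (Spec_lista_feltoltes args out) := by unfold Spec_lista_feltoltes; infer_instance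

-- ===== CLAIM (what is proved, stated in full; the proofs are below) =====
def Claim_equal_lista_feltoltes : Prop := ∀ (args : List String), Dom_lista_feltoltes args → Spec_lista_feltoltes args (lista_feltoltes args)

-- ===== LEMMAS AND PROOFS =====
theorem pvAppendLast_length (gs : List (List String)) (x : String) :
    (pvAppendLast gs x).length = gs.length := by
  induction gs with
  | nil => rfl
  | cons g rest ih =>
    cases rest with
    | nil => rfl
    | cons h t => simpa [pvAppendLast] using ih

theorem pvAppendLast_getD (gs : List (List String)) (x : String) (i : Nat) :
    (pvAppendLast gs x).getD i [] =
      if i + 1 = gs.length then gs.getD i [] ++ [x] else gs.getD i [] := by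
  induction gs generalizing i with
  | nil => simp [pvAppendLast]
  | cons g rest ih =>
    cases rest with
    | nil =>
      cases i with
      | zero => simp [pvAppendLast]
      | succ j => simp [pvAppendLast]
    | cons h t =>
      cases i with
      | zero =>
        have : ¬ (0 + 1 = (g :: h :: t).length) := by simp
        simp [pvAppendLast]
      | succ j =>
        simp only [pvAppendLast, List.getD_cons_succ, List.length_cons]
        rw [ih j]
        by_cases hj : j + 1 = (h :: t).length
        · rw [if_pos hj, if_pos (by simp at hj ⊢; omega)]
        · rw [if_neg hj, if_neg (by simp at hj ⊢; omega)]

theorem getD_append_nil (gs : List (List String)) (i : Nat) :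
    (gs ++ [([] : List String)]).getD i [] = gs.getD i [] := by
  by_cases h : i < gs.length
  · simp [List.getD, List.getElem?_append_left h]
  · by_cases h2 : i = gs.length
    · simp [List.getD, h2]
    · rw [List.getD_eq_default _ _ (by simp; omega), List.getD_eq_default _ _ (by omega)]

theorem pvAppendLast_ne_nil (gs : List (List String)) (x : String) (h : gs ≠ []) :
    pvAppendLast gs x ≠ [] := by
  have hl := pvAppendLast_length gs x
  intro hc
  rw [hc] at hl
  cases gs with
  | nil => exact h rfl
  | cons a t => simp at hl

theorem loop_eq (args : List String) : ∀ (gs : List (List String)) (l1 l2 : List String) (n : Int),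
    gs ≠ [] → n = (gs.length : Int) - 1 → l1 = gs.getD 1 [] → l2 = gs.getD 2 [] →
    (let st := args.foldl (fun (st : List String × List String × Int) arg =>
        if arg == "L:" then (st.1, st.2.1, st.2.2 + 1)
        else if st.2.2 == 1 then (st.1 ++ [arg], st.2.1, st.2.2)
        else if st.2.2 == 2 then (st.1, st.2.1 ++ [arg], st.2.2)
        else st) (l1, l2, n)
     let gs' := args.foldl (fun gs arg =>
        if arg == "L:" then gs ++ [[]] else pvAppendLast gs arg) gs
     (st.1, st.2.1) = (gs'.getD 1 [], gs'.getD 2 [])) := by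
  induction args with
  | nil => intro gs l1 l2 n hne hn h1 h2; simp [h1, h2]
  | cons a rest ih =>
    intro gs l1 l2 n hne hn h1 h2
    simp only [List.foldl_cons]
    by_cases ha : a == "L:"
    · simp only [ha, if_true]
      exact ih (gs ++ [[]]) l1 l2 (n + 1) (by simp)
        (by simp only [List.length_append, List.length_cons, List.length_nil]; omega)
        (by rw [h1, getD_append_nil]) (by rw [h2, getD_append_nil])
    · simp only [ha, if_false, Bool.false_eq_true]
      have hlen := pvAppendLast_length gs a
      have hg1 := pvAppendLast_getD gs a 1
      have hg2 := pvAppendLast_getD gs a 2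
      have hlpos : 1 ≤ gs.length := by cases gs <;> simp_all
      by_cases hn1 : n = 1
      · have hl : gs.length = 2 := by omega
        simp only [hn1, show ((1:Int) == 1) = true by decide, if_true]
        exact ih (pvAppendLast gs a) (l1 ++ [a]) l2 1 (pvAppendLast_ne_nil gs a hne)
          (by rw [hlen]; omega)
          (by rw [hg1, if_pos (by omega), h1]) (by rw [hg2, if_neg (by omega), h2])
      · by_cases hn2 : n = 2
        · have hl : gs.length = 3 := by omega
          simp only [hn2, show ((2:Int) == 1) = false by decide,
            show ((2:Int) == 2) = true by decide, if_true, if_false, Bool.false_eq_true]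
          exact ih (pvAppendLast gs a) l1 (l2 ++ [a]) 2 (pvAppendLast_ne_nil gs a hne)
            (by rw [hlen]; omega)
            (by rw [hg1, if_neg (by omega), h1]) (by rw [hg2, if_pos (by omega), h2])
        · simp only [show (n == 1) = false by simpa using hn1,
            show (n == 2) = false by simpa using hn2, if_false, Bool.false_eq_true]
          exact ih (pvAppendLast gs a) l1 l2 n (pvAppendLast_ne_nil gs a hne)
            (by rw [hlen]; omega)
            (by rw [hg1, if_neg (by omega), h1]) (by rw [hg2, if_neg (by omega), h2])


-- ===== VERDICT (by name: the statement is the Claim_ definition above) =====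
theorem lista_feltoltes_spec : Claim_equal_lista_feltoltes := by
  intro args _
  unfold Spec_lista_feltoltes lista_feltoltes lista_feltoltes_alt
  exact loop_eq args [[]] [] [] 0 (by simp) (by simp) (by simp) (by simp)
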